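-- pv_equiv track=rewrite | github.com/gradgrind/WZ3 | wz/ui/edi_table.py | tsv2table
-- ===== SOURCE A (Python) =====
-- def tsv2table(text):
--     """Parse a "tsv" (tab separated value) string into a list of lists
--     of strings (a "table").
--
--     The input text is tabulated using tabulation characters to separate
--     the fields of a row and newlines to separate columns.
--
--     The output lines are padded with '' values to ensure that all lines
--     have the same length.
--
--     Note that only '\n' is acceptable as the newline character. Other
--     special whitespace characters will be left untouched.
--     """
--     rows = text.split("\n")
--     # 'splitlines' can't be used as it loses trailing empty lines.
--     table_data = []
--     max_len = 0
--     for row in rows: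
--         line = row.split("\t")
--         l = len(line)
--         if l > max_len:
--             max_len = l
--         table_data.append((line, l))
--     result = []
--     for line, l in table_data:
--         if l < max_len:
--             line += [""] * (max_len - l)
--         result.append(line)
--     return result
-- ===== SOURCE B (Python) =====
-- def tsv2table(text):
--     """Parse a "tsv" (tab separated value) string into a list of lists
--     of strings (a "table"), padding short lines with '' values.
--
--     Column-oriented rewrite: instead of tracking a max length and
--     padding each row, peel one field (or '' when a row is exhausted)
--     off every row per column, then transpose the columns back into
--     rows; the padding emerges from the column-wise traversal.
--     """
--     rows = [line.split("\t") for line in text.split("\n")]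
--     columns = []
--     while any(rows):
--         columns.append([r[0] if r else "" for r in rows])
--         rows = [r[1:] for r in rows]
--     return [list(t) for t in zip(*columns)]
-- ===== Notes on version B (the rewrite author's own statement) =====
-- stated objective: alternative
-- what changed: Padding is produced by a double transposition (a hand-rolled zip_longest over rows into columns, then zip back into rows) instead of tracking a max length and padding each row with a slice-append pass.
import Mathlib
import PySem

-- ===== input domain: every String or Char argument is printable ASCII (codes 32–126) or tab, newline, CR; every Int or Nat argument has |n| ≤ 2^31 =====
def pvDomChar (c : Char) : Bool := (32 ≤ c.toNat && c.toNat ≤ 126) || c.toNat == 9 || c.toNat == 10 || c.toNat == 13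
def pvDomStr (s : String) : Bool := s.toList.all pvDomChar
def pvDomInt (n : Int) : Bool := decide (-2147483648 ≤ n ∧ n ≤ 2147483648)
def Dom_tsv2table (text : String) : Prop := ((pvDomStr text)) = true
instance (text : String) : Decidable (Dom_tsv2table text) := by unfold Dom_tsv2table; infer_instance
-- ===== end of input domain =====

-- B pads via a double transposition (rows → columns with '' fill, columns → rows) instead of
-- A's max-length tracking with a per-row pad; same result, stated objective: alternative algorithm.

-- ===== PORT A =====
-- text.split("\n") / row.split("\t"): separator is a literal non-empty string, so
-- PySem.Str.split? is always `some`; `.getD []` only unwraps it.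
def tsv2table (text : String) : List (List String) :=
  let rows := (PySem.Str.split? text "\n").getD []
  let td := rows.foldl (fun (st : List (List String × Int) × Int) row =>
      let line := (PySem.Str.split? row "\t").getD []
      let l : Int := line.length
      (st.1 ++ [(line, l)], if l > st.2 then l else st.2)) ([], 0)
  td.1.foldl (fun result (p : List String × Int) =>
      let line := if p.2 < td.2 then p.1 ++ List.replicate (td.2 - p.2).toNat "" else p.1
      result ++ [line]) []

-- ===== PORT B =====
-- termination measure for the two column loops of Source B (cited by decreasing_by)
theorem pvSumTailLe (rows : List (List String)) :
    ((rows.map List.tail).map List.length).sum ≤ (rows.map List.length).sum := by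
  induction rows with
  | nil => simp
  | cons q qs ih =>
    simp only [List.map_cons, List.sum_cons]
    have : q.tail.length ≤ q.length := by cases q <;> simp
    omega

theorem pvSumTailLt (rows : List (List String)) (h : ∃ r ∈ rows, r ≠ []) :
    ((rows.map List.tail).map List.length).sum < (rows.map List.length).sum := by
  induction rows with
  | nil => simp at h
  | cons r rs ih =>
    rcases h with ⟨x, hx, hne⟩
    rcases List.mem_cons.mp hx with hx | hx
    · cases r with
      | nil => exact absurd hx hne
      | cons a t =>
        simp only [List.map_cons, List.sum_cons, List.tail_cons, List.length_cons]
        have := pvSumTailLe rs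
        omega
    · have hlt := ih ⟨x, hx, hne⟩
      simp only [List.map_cons, List.sum_cons, List.length_tail]
      omega

-- while any(rows): columns.append([r[0] if r else "" for r in rows]); rows = [r[1:] for r in rows]
def altColumns (rows : List (List String)) : List (List String) :=
  if h : rows.any (fun r => !r.isEmpty) then
    (rows.map (fun r => r.headD "")) :: altColumns (rows.map List.tail)
  else []
termination_by (rows.map List.length).sum
decreasing_by
  have e : ∃ r ∈ rows, r ≠ [] := by
    rcases List.any_eq_true.mp h with ⟨r, hr, hne⟩
    exact ⟨r, hr, by simpa using hne⟩
  have := pvSumTailLt rows e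
  simpa using this

-- [list(t) for t in zip(*columns)]  (zip truncates at the first exhausted column; zip() of no columns is empty)
def altZip (cols : List (List String)) : List (List String) :=
  match cols with
  | [] => []
  | c :: cs =>
    if h : (c :: cs).all (fun col => !col.isEmpty) then
      ((c :: cs).map (fun col => col.headD "")) :: altZip ((c :: cs).map List.tail)
    else []
termination_by ((cols.map List.length).sum)
decreasing_by
  have hc : c ≠ [] := by
    have := (List.all_eq_true.mp h) c (by simp)
    simpa using this
  have := pvSumTailLt (c :: cs) ⟨c, by simp, hc⟩
  simpa using this

def tsv2table_alt (text : String) : List (List String) :=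
  let rows := ((PySem.Str.split? text "\n").getD []).map
      (fun line => (PySem.Str.split? line "\t").getD [])
  altZip (altColumns rows)

-- ===== PRECONDITION & SPEC =====
def Spec_tsv2table (text : String) (out : List (List String)) : Prop := out = tsv2table_alt text
instance (text : String) (out : List (List String)) : Decidable (Spec_tsv2table text out) := by unfold Spec_tsv2table; infer_instance

-- ===== CLAIM (what is proved, stated in full; the proofs are below) =====
def Claim_equal_tsv2table : Prop := ∀ (text : String), Dom_tsv2table text → Spec_tsv2table text (tsv2table text)

-- ===== LEMMAS AND PROOFS =====

-- proof-only helpers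
def pvLine (row : String) : List String := (PySem.Str.split? row "\t").getD []
def pvPad (m : Nat) (r : List String) : List String := r ++ List.replicate (m - r.length) ""
def pvTrans : Nat → List (List String) → List (List String)
  | 0, _ => []
  | m+1, rows => (rows.map (fun r => r.headD "")) :: pvTrans m (rows.map List.tail)

-- splitOn never returns []
theorem pvGoNeNil (sep : List Char) (fuel : Nat) (l cur : List Char) (acc : List (List Char)) :
    PySem.Chars.splitOn.go sep fuel l cur acc ≠ [] := by
  induction fuel generalizing l cur acc with
  | zero => simp [PySem.Chars.splitOn.go]
  | succ n ih =>
    cases l with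
    | nil => simp [PySem.Chars.splitOn.go]
    | cons c rest =>
      rw [PySem.Chars.splitOn.go]
      split <;> apply ih

theorem pvSplitGetDNeNil (s sep : String) (h : sep.toList ≠ []) :
    (PySem.Str.split? s sep).getD [] ≠ [] := by
  have : PySem.Chars.split? s.toList sep.toList
      = some (PySem.Chars.splitOn s.toList sep.toList) := by
    simp [PySem.Chars.split?, List.isEmpty_iff, h]
  simp [PySem.Str.split?, this]
  intro hnil
  exact pvGoNeNil _ _ _ _ _ hnil

-- A's first fold builds the table and the running max
theorem pvFoldA (rows : List String) (acc : List (List String × Int)) (m0 : Int) :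
    rows.foldl (fun (st : List (List String × Int) × Int) row =>
        (st.1 ++ [(pvLine row, ((pvLine row).length : Int))],
         if ((pvLine row).length : Int) > st.2 then ((pvLine row).length : Int) else st.2))
      (acc, m0)
    = (acc ++ rows.map (fun row => (pvLine row, ((pvLine row).length : Int))),
       rows.foldl (fun a row => max a ((pvLine row).length : Int)) m0) := by
  induction rows generalizing acc m0 with
  | nil => simp
  | cons r rs ih =>
    simp only [List.foldl_cons, List.map_cons]
    rw [ih]
    have hm : (if ((pvLine r).length : Int) > m0 then ((pvLine r).length : Int) else m0)
        = max m0 ((pvLine r).length : Int) := by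
      rw [max_def]; split <;> split <;> omega
    rw [hm]
    simp

-- the Int max-fold from 0 is the Nat max-fold, cast
theorem pvFoldMaxCast (rows : List String) (n : Nat) :
    rows.foldl (fun a row => max a ((pvLine row).length : Int)) (n : Int)
      = ((rows.foldl (fun a row => Nat.max a (pvLine row).length) n : Nat) : Int) := by
  induction rows generalizing n with
  | nil => simp
  | cons r rs ih =>
    simp only [List.foldl_cons]
    rw [show (max (n : Int) ((pvLine r).length : Int)) = ((Nat.max n (pvLine r).length : Nat) : Int) by
      push_cast
      rfl]
    exact ih _

def pvMax (lines : List String) : Nat :=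
  lines.foldl (fun a row => Nat.max a (pvLine row).length) 0

theorem pvLeFoldMax (lines : List String) (n : Nat) :
    n ≤ lines.foldl (fun a row => Nat.max a (pvLine row).length) n ∧
      ∀ row ∈ lines, (pvLine row).length ≤ lines.foldl (fun a row => Nat.max a (pvLine row).length) n := by
  induction lines generalizing n with
  | nil => simp
  | cons r rs ih =>
    obtain ⟨h1, h2⟩ := ih (Nat.max n (pvLine r).length)
    refine ⟨le_trans (Nat.le_max_left _ _) h1, ?_⟩
    intro row hrow
    rcases List.mem_cons.mp hrow with h | h
    · subst h; exact le_trans (Nat.le_max_right _ _) h1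
    · exact h2 row h

theorem pvFoldMaxAttain (lines : List String) (n : Nat) :
    lines.foldl (fun a row => Nat.max a (pvLine row).length) n = n ∨
      ∃ row ∈ lines, (pvLine row).length
        = lines.foldl (fun a row => Nat.max a (pvLine row).length) n := by
  induction lines generalizing n with
  | nil => simp
  | cons r rs ih =>
    simp only [List.foldl_cons]
    rcases ih (Nat.max n (pvLine r).length) with h | ⟨row, hrow, hlen⟩
    · rw [h]
      by_cases hc : (pvLine r).length ≤ n
      · left; exact Nat.max_eq_left hc
      · right; exact ⟨r, by simp, (Nat.max_eq_right (by omega)).symm⟩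
    · right; exact ⟨row, List.mem_cons_of_mem _ hrow, hlen⟩

-- A's second fold just maps the padding over the table
theorem pvFoldB (l : List (List String × Int)) (acc : List (List String)) (M : Int) :
    l.foldl (fun result (p : List String × Int) =>
        result ++ [if p.2 < M then p.1 ++ List.replicate (M - p.2).toNat "" else p.1]) acc
      = acc ++ l.map (fun p => if p.2 < M then p.1 ++ List.replicate (M - p.2).toNat "" else p.1) := by
  induction l generalizing acc with
  | nil => simp
  | cons x xs ih => simp [ih]

theorem pvBranchPad (r : List String) (m : Nat) (h : r.length ≤ m) :
    (if ((r.length : Int)) < (m : Int) then r ++ List.replicate (((m : Int) - (r.length : Int)).toNat) "" else r)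
      = pvPad m r := by
  unfold pvPad
  split_ifs with hc
  · congr 1
    congr 1
    omega
  · have : r.length = m := by omega
    simp [this]

-- A computes row-wise padding to the max length
theorem pvAEq (text : String) :
    tsv2table text
      = (((PySem.Str.split? text "\n").getD []).map pvLine).map
          (pvPad (pvMax ((PySem.Str.split? text "\n").getD []))) := by
  unfold tsv2table
  simp only [← pvLine.eq_def]
  rw [pvFoldA]
  rw [show (0 : Int) = ((0 : Nat) : Int) by simp, pvFoldMaxCast]
  simp only [List.nil_append]
  rw [pvFoldB]
  simp only [List.nil_append, List.map_map]
  apply List.map_congr_left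
  intro row hrow
  have hle : (pvLine row).length ≤ pvMax ((PySem.Str.split? text "\n").getD []) :=
    (pvLeFoldMax _ 0).2 row hrow
  simpa using pvBranchPad (pvLine row) (pvMax ((PySem.Str.split? text "\n").getD [])) hle

-- B-side: both column loops are pvTrans
theorem pvAltColsEq (m : Nat) (rows : List (List String))
    (h1 : ∀ r ∈ rows, r.length ≤ m)
    (h2 : m = 0 ∨ ∃ r ∈ rows, r.length = m) :
    altColumns rows = pvTrans m rows := by
  induction m generalizing rows with
  | zero =>
    rw [altColumns]
    rw [dif_neg]
    · rfl
    · simp only [List.any_eq_true, not_exists]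
      intro r
      rintro ⟨hr, hne⟩
      have := h1 r hr
      have : r = [] := List.length_eq_zero_iff.mp (Nat.le_zero.mp this)
      simp [this] at hne
  | succ m ih =>
    rcases h2 with h2 | ⟨r0, hr0, hlen⟩
    · omega
    rw [altColumns, dif_pos]
    · rw [pvTrans]
      congr 1
      apply ih
      · intro r hr
        rcases List.mem_map.mp hr with ⟨r', hr', rfl⟩
        have := h1 r' hr'
        simp only [List.length_tail]
        omega
      · right
        exact ⟨r0.tail, List.mem_map.mpr ⟨r0, hr0, rfl⟩, by simp [List.length_tail, hlen]⟩
    · refine List.any_eq_true.mpr ⟨r0, hr0, ?_⟩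
      have hne' : r0 ≠ [] := by intro hnil; rw [hnil] at hlen; simp at hlen
      simp [hne']

theorem pvTransColLen (m : Nat) (rows : List (List String)) (c : List String)
    (hc : c ∈ pvTrans m rows) : c.length = rows.length := by
  induction m generalizing rows with
  | zero => simp [pvTrans] at hc
  | succ m ih =>
    rw [pvTrans] at hc
    rcases List.mem_cons.mp hc with h | h
    · subst h; simp
    · have := ih (rows.map List.tail) h
      simpa using this

theorem pvAltZipEq (n : Nat) (cols : List (List String)) (hne : cols ≠ [])
    (hlen : ∀ c ∈ cols, c.length = n) :
    altZip cols = pvTrans n cols := by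
  induction n generalizing cols with
  | zero =>
    match cols with
    | [] => exact absurd rfl hne
    | c :: cs =>
      rw [altZip.eq_def]
      simp only
      rw [dif_neg]
      · rfl
      · have : c = [] := List.length_eq_zero_iff.mp (hlen c (by simp))
        simp [this]
  | succ n ih =>
    match cols with
    | [] => exact absurd rfl hne
    | c :: cs =>
      rw [altZip.eq_def]
      simp only
      rw [dif_pos]
      · rw [pvTrans]
        congr 1
        apply ih
        · simp
        · intro x hx
          rcases List.mem_map.mp hx with ⟨x', hx', rfl⟩
          have := hlen x' hx'
          simp [List.length_tail, this]
      · refine List.all_eq_true.mpr ?_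
        intro col hcol
        have hcl := hlen col hcol
        have hne' : col ≠ [] := by intro hnil; rw [hnil] at hcl; simp at hcl
        simp [hne']

theorem pvMapTailTrans (m : Nat) (r : List String) (rs : List (List String)) :
    (pvTrans m (r :: rs)).map List.tail = pvTrans m rs := by
  induction m generalizing r rs with
  | zero => simp [pvTrans]
  | succ m ih =>
    rw [pvTrans, pvTrans]
    simp only [List.map_cons, List.tail_cons]
    congr 1
    exact ih r.tail (rs.map List.tail)

theorem pvMapHeadTrans (m : Nat) (r : List String) (rs : List (List String)) (h : r.length ≤ m) :
    (pvTrans m (r :: rs)).map (fun c => c.headD "") = pvPad m r := by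
  induction m generalizing r rs with
  | zero =>
    have : r = [] := List.length_eq_zero_iff.mp (Nat.le_zero.mp h)
    simp [pvTrans, pvPad, this]
  | succ m ih =>
    rw [pvTrans]
    simp only [List.map_cons, List.headD_cons]
    rw [ih r.tail (rs.map List.tail) (by simp [List.length_tail]; omega)]
    cases r with
    | nil => simp [pvPad, List.replicate_succ]
    | cons a t =>
      simp only [List.headD_cons, List.tail_cons]
      unfold pvPad
      simp only [List.length_cons, List.cons_append]
      have e : m + 1 - (t.length + 1) = m - t.length := by omega
      rw [e]

theorem pvDouble (rows : List (List String)) (m : Nat) (h : ∀ r ∈ rows, r.length ≤ m) :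
    pvTrans rows.length (pvTrans m rows) = rows.map (pvPad m) := by
  induction rows with
  | nil => simp [pvTrans]
  | cons r rs ih =>
    simp only [List.length_cons, List.map_cons]
    rw [pvTrans]
    rw [pvMapHeadTrans m r rs (h r (by simp))]
    rw [pvMapTailTrans]
    congr 1
    exact ih (fun x hx => h x (List.mem_cons_of_mem _ hx))

theorem pvBMain (row0 : String) (L' : List String) :
    altZip (altColumns ((row0 :: L').map pvLine))
      = ((row0 :: L').map pvLine).map (pvPad (pvMax (row0 :: L'))) := by
  have hbound : ∀ r ∈ (row0 :: L').map pvLine, r.length ≤ pvMax (row0 :: L') := by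
    intro r hr
    rcases List.mem_map.mp hr with ⟨row, hrow, rfl⟩
    exact (pvLeFoldMax (row0 :: L') 0).2 row hrow
  have hmpos : 1 ≤ pvMax (row0 :: L') := by
    have hne0 : pvLine row0 ≠ [] := pvSplitGetDNeNil row0 "\t" (by decide)
    have h1 : 1 ≤ (pvLine row0).length := by
      cases h : pvLine row0 with
      | nil => exact absurd h hne0
      | cons a t => simp
    exact le_trans h1 ((pvLeFoldMax (row0 :: L') 0).2 row0 (by simp))
  have hattain : pvMax (row0 :: L') = 0 ∨
      ∃ r ∈ (row0 :: L').map pvLine, r.length = pvMax (row0 :: L') := by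
    rcases pvFoldMaxAttain (row0 :: L') 0 with h | ⟨row, hrow, hlen⟩
    · left; exact h
    · right; exact ⟨pvLine row, List.mem_map.mpr ⟨row, hrow, rfl⟩, by simpa [pvMax] using hlen⟩
  rw [pvAltColsEq (pvMax (row0 :: L')) ((row0 :: L').map pvLine) hbound hattain]
  have hcne : pvTrans (pvMax (row0 :: L')) ((row0 :: L').map pvLine) ≠ [] := by
    obtain ⟨m', hm'⟩ : ∃ m', pvMax (row0 :: L') = m' + 1 :=
      ⟨pvMax (row0 :: L') - 1, by omega⟩
    rw [hm', pvTrans]; simp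
  rw [pvAltZipEq ((row0 :: L').map pvLine).length _ hcne
    (fun c hc => pvTransColLen _ _ c hc)]
  exact pvDouble _ _ hbound

theorem pvBEq (text : String) :
    tsv2table_alt text
      = (((PySem.Str.split? text "\n").getD []).map pvLine).map
          (pvPad (pvMax ((PySem.Str.split? text "\n").getD []))) := by
  unfold tsv2table_alt
  simp only [← pvLine.eq_def]
  have hLne : (PySem.Str.split? text "\n").getD [] ≠ [] :=
    pvSplitGetDNeNil text "\n" (by decide)
  obtain ⟨x, xs, e⟩ := List.exists_cons_of_ne_nil hLne
  rw [e]
  exact pvBMain x xs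

-- ===== VERDICT (by name: the statement is the Claim_ definition above) =====
theorem tsv2table_spec : Claim_equal_tsv2table := by
  intro text _
  unfold Spec_tsv2table
  rw [pvAEq, pvBEq]
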